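-- pv_equiv track=rewrite | github.com/EMIRBEN001/Biology_AS2 | Assignment/Frequency.py | generate_mrna_sequences
-- ===== SOURCE A (Python) =====
-- def generate_mrna_sequences(codon_possibilities):
--     if len(codon_possibilities) == 1:
--         return codon_possibilities[0]
--     else:
--         previous_combinations = generate_mrna_sequences(codon_possibilities[:-1])
--         new_combinations = []
--         for combination in previous_combinations:
--             for codon in codon_possibilities[-1]:
--                 new_combinations.append(combination + codon)
--         return new_combinations
-- ===== SOURCE B (Python) =====
-- def generate_mrna_sequences(codon_possibilities):
--     acc = codon_possibilities[0]
--     for lst in codon_possibilities[1:]: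
--         acc = [combo + codon for combo in acc for codon in lst]
--     return acc
-- ===== Notes on version B (the rewrite author's own statement) =====
-- stated objective: simpler
-- what changed: Replaces right-peeling recursion (slicing off the last list each call) with a single left-to-right iterative fold that rebuilds the accumulator with a flat comprehension.
import Mathlib
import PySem

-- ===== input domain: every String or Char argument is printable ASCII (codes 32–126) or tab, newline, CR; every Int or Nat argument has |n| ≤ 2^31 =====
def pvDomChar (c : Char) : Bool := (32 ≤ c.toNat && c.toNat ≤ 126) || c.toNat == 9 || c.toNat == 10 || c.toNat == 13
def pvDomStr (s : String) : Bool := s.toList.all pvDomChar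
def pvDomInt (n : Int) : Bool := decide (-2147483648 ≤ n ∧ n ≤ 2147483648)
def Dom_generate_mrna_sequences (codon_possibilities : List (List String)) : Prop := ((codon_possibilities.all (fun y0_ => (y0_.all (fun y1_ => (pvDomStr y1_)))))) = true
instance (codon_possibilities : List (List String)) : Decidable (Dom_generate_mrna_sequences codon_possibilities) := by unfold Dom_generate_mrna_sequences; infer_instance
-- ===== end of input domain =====

-- B replaces A's right-peeling recursion with a single iterative left fold; objective: simpler.
-- On the empty list A raises RecursionError and B raises IndexError; Pre_ excludes it.

-- ===== PORT A =====
-- Literal port of A: recursion on codon_possibilities[:-1] (dropLast), then the nested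
-- append loop over the last list.  On [] Python A recurses forever (RecursionError);
-- the port returns [] there, and Pre_ excludes that input.
def generate_mrna_sequences (codon_possibilities : List (List String)) : List String :=
  if _h0 : codon_possibilities = [] then []
  else if codon_possibilities.length = 1 then
    codon_possibilities.headD []
  else
    let previous_combinations := generate_mrna_sequences codon_possibilities.dropLast
    let lastL := codon_possibilities.getLastD []
    previous_combinations.foldl
      (fun new_combinations combination =>
        lastL.foldl (fun acc codon => acc ++ [combination ++ codon]) new_combinations) []
termination_by codon_possibilities.length
decreasing_by
  have : codon_possibilities.length ≠ 0 := by
    simpa [List.length_eq_zero_iff] using _h0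
  simp [List.length_dropLast]; omega

-- ===== PORT B =====
-- Port of B: acc = first list, then fold the remaining lists, rebuilding acc with
-- the flat comprehension [combo + codon for combo in acc for codon in lst].
-- On [] Python B raises IndexError; the port returns [] there (excluded by Pre_).
def generate_mrna_sequences_alt (codon_possibilities : List (List String)) : List String :=
  match codon_possibilities with
  | [] => []
  | h :: t =>
    t.foldl (fun acc lst => acc.flatMap (fun combo => lst.map (fun codon => combo ++ codon))) h

-- ===== PRECONDITION & SPEC =====
-- Pre_ excludes only the empty list, on which Python A raises RecursionError (and B IndexError).
def Pre_generate_mrna_sequences (codon_possibilities : List (List String)) : Prop :=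
  codon_possibilities ≠ []
instance (codon_possibilities : List (List String)) : Decidable (Pre_generate_mrna_sequences codon_possibilities) := by unfold Pre_generate_mrna_sequences; infer_instance
def pvWitness_generate_mrna_sequences : List (List String) := [["AU", "GC"], ["A"]]

def Spec_generate_mrna_sequences (codon_possibilities : List (List String)) (out : List String) : Prop := out = generate_mrna_sequences_alt codon_possibilities
instance (codon_possibilities : List (List String)) (out : List String) : Decidable (Spec_generate_mrna_sequences codon_possibilities out) := by unfold Spec_generate_mrna_sequences; infer_instance

-- ===== CLAIM (what is proved, stated in full; the proofs are below) =====
def Claim_equal_generate_mrna_sequences : Prop := ∀ (codon_possibilities : List (List String)), Dom_generate_mrna_sequences codon_possibilities → Pre_generate_mrna_sequences codon_possibilities → Spec_generate_mrna_sequences codon_possibilities (generate_mrna_sequences codon_possibilities)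

-- ===== LEMMAS AND PROOFS =====

-- A's inner append loop over one list is a map appended to the accumulator.
theorem inner_loop_eq (l : List String) (combination : String) (acc : List String) :
    l.foldl (fun a codon => a ++ [combination ++ codon]) acc
      = acc ++ l.map (fun codon => combination ++ codon) := by
  induction l generalizing acc with
  | nil => simp
  | cons x xs ih => simp [List.foldl_cons, ih, List.append_assoc]

-- A's outer loop is flatMap.
theorem outer_loop_eq (prev l : List String) (init : List String) :
    prev.foldl (fun nc combination =>
        l.foldl (fun a codon => a ++ [combination ++ codon]) nc) init
      = init ++ prev.flatMap (fun combo => l.map (fun codon => combo ++ codon)) := by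
  induction prev generalizing init with
  | nil => simp
  | cons c cs ih =>
    rw [List.foldl_cons, inner_loop_eq, ih]
    simp [List.append_assoc]

-- B on a snoc: folding one more list is one flatMap step.
theorem alt_snoc (xs : List (List String)) (l : List String) (hxs : xs ≠ []) :
    generate_mrna_sequences_alt (xs ++ [l])
      = (generate_mrna_sequences_alt xs).flatMap
          (fun combo => l.map (fun codon => combo ++ codon)) := by
  match xs with
  | [] => exact absurd rfl hxs
  | h :: t => simp [generate_mrna_sequences_alt, List.foldl_append]

theorem main_eq : ∀ (n : ℕ) (cp : List (List String)), cp.length = n → cp ≠ [] →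
    generate_mrna_sequences cp = generate_mrna_sequences_alt cp := by
  intro n
  induction n with
  | zero => intro cp hlen hne; exact absurd (List.length_eq_zero_iff.mp hlen) hne
  | succ n ih =>
    intro cp hlen hne
    by_cases h1 : cp.length = 1
    · obtain ⟨x, rfl⟩ : ∃ x, cp = [x] := List.length_eq_one_iff.mp h1
      simp [generate_mrna_sequences, generate_mrna_sequences_alt]
    · have hn1 : n ≠ 0 := by
        intro h; apply h1; omega
      have hdne : cp.dropLast ≠ [] := by
        intro h
        have := congrArg List.length h
        simp [List.length_dropLast, hlen] at this
        omega
      have hlast : cp.dropLast ++ [cp.getLastD []] = cp := by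
        have h := List.dropLast_concat_getLast hne
        simpa [List.getLastD_eq_getLast?, List.getLast?_eq_getLast_of_ne_nil hne] using h
      have ihd := ih cp.dropLast (by simp [List.length_dropLast, hlen]) hdne
      rw [generate_mrna_sequences, dif_neg hne, if_neg h1]
      rw [outer_loop_eq, List.nil_append, ihd]
      rw [← alt_snoc cp.dropLast (cp.getLastD []) hdne, hlast]

-- ===== VERDICT (by name: the statement is the Claim_ definition above) =====
theorem generate_mrna_sequences_spec : Claim_equal_generate_mrna_sequences := by
  intro cp _ hpre
  unfold Spec_generate_mrna_sequences
  exact main_eq cp.length cp rfl hpre
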